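-- pv_equiv track=rewrite | github.com/SCU-JJkinging/BERT-Chinese-NER-pytorch | scripts/estimate.py | find_all_tag
-- ===== SOURCE A (Python) =====
-- tags = [(1, 2), (3, 4), (5, 6)]
--
-- def find_tag(input, B_label_id=1, I_label_id=2):
--     '''
--     找到指定的label
--     :param input: 模型预测输出的路径 shape = [batch的个数, batch_size, rel_seq_len]
--     :param B_label_id:
--     :param I_label_id:
--     :return:
--     '''
--     result = []
--     batch_tag = []
--     sentence_tag = []
--     for batch in input:
--         for out_id_list in batch:
--             for num in range(len(out_id_list)):
--                 if out_id_list[num] == B_label_id: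
--                     start_pos = num
--                 if out_id_list[num] == I_label_id and out_id_list[num-1] == B_label_id:
--                     length = 2
--                     for num2 in range(num, len(out_id_list)):
--                         if out_id_list[num2] == I_label_id and out_id_list[num2-1] == I_label_id:
--                             length += 1
--                             if out_id_list[num2] == 9:  # 到达末尾
--                                 sentence_tag.append((start_pos, length))
--                                 break
--                         if out_id_list[num2] == 7:
--                             sentence_tag.append((start_pos, length))
--                             break
--             batch_tag.append(sentence_tag)
--             sentence_tag = []
--         result.append(batch_tag)
--         batch_tag = []
--
--     return result
--
-- def find_all_tag(input):
--     num = 1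
--     result = {}
--     for tag in tags:
--         res = find_tag(input, B_label_id=tag[0], I_label_id=tag[1])
--         result[num] = res
--         num += 1
--     return result
-- ===== SOURCE B (Python) =====
-- tags = [(1, 2), (3, 4), (5, 6)]
--
-- def _scan(sent, B_label_id, I_label_id):
--     # a span is only ever emitted when a 7 closes it, so a sentence without 7 has none
--     if 7 not in sent:
--         return []
--     # one right-to-left pass: remember whether a 7 lies to the right and how many
--     # adjacent (I, I) pairs sit between the current position and that nearest 7
--     spans = []
--     seen7 = False
--     cnt = 0
--     for i in range(len(sent) - 1, 0, -1):
--         if sent[i] == 7: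
--             seen7 = True
--             cnt = 0
--         elif sent[i] == I_label_id and sent[i - 1] == I_label_id:
--             cnt += 1
--         if sent[i] == I_label_id and sent[i - 1] == B_label_id and seen7:
--             spans.append((i - 1, 2 + cnt))
--     spans.reverse()
--     return spans
--
-- def find_all_tag(input):
--     return {k: [[_scan(sent, B, I) for sent in batch] for batch in input]
--             for k, (B, I) in enumerate(tags, 1)}
-- ===== Notes on version B (the rewrite author's own statement) =====
-- stated objective: faster
-- what changed: A runs the whole triple index loop once per tag pair and rescans the rest of the sentence from every (B,I) start to find the closing 7 and recount (I,I) pairs; B skips sentences with no 7 outright (no span can be emitted without one) and otherwise makes a single right-to-left pass per sentence carrying the nearest-7 flag and a running (I,I)-pair count, emitting each span in O(1).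
-- intended difference: On inputs containing a sentence that begins with an I-tag, ends with the matching B-tag and contains a 7, Python's negative indexing makes A treat position 0 as a span start and emit it with a start position left over from an earlier sentence; B emits no span there, which is the intended behaviour since no B-tag precedes that I-tag. — e.g. on find_all_tag([[[1, 7], [2, 7, 1]]]): A returns [(1, [[[], [(0, 2)]]]), (2, [[[], []]]), (3, [[[], []]])], B returns [(1, [[[], []]]), (2, [[[], []]]), (3, [[[], []]])]
import Mathlib
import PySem

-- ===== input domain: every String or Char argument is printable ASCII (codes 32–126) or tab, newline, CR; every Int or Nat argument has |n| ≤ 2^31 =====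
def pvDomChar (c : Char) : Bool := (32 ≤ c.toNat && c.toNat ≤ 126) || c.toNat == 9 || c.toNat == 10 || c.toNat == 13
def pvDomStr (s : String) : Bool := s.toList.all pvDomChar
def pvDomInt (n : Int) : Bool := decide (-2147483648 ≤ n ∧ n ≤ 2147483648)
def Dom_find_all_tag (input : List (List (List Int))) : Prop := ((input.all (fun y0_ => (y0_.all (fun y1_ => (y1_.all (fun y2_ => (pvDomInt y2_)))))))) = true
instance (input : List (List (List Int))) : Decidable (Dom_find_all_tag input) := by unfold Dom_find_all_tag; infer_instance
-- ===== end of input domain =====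

-- B replaces A's per-start rescans (and is proved equal to A outside D_): one linear
-- right-to-left pass per sentence instead of a quadratic inner scan per span start.

-- ===== PORT A =====
def pvTags : List (Int × Int) := [(1, 2), (3, 4), (5, 6)]

-- the inner 'for num2 in range(num, len(out_id_list))' loop of find_tag;
-- returns 'some length' on a break that appends, 'none' if the loop runs off the end
def pvInnerA (s : List Int) (I : Int) : List Int → Int → Option Int
  | [], _ => none
  | n2 :: rest, length =>
    if PySem.List.pyGetD s n2 0 == I && PySem.List.pyGetD s (n2 - 1) 0 == I then
      let length := length + 1
      if PySem.List.pyGetD s n2 0 == 9 then some length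
      else if PySem.List.pyGetD s n2 0 == 7 then some length
      else pvInnerA s I rest length
    else if PySem.List.pyGetD s n2 0 == 7 then some length
    else pvInnerA s I rest length

-- one step of 'for num in range(len(out_id_list))'; state = (sentence_tag, start_pos).
-- start_pos = none is Python's unbound start_pos: reading it raises NameError (excluded
-- by Pre_find_all_tag); the port totalises that read with getD 0.
def pvSentStepA (B I : Int) (s : List Int) (st : List (Int × Int) × Option Int) (num : Int) :
    List (Int × Int) × Option Int :=
  let start := if PySem.List.pyGetD s num 0 == B then some num else st.2
  let tag :=
    if PySem.List.pyGetD s num 0 == I && PySem.List.pyGetD s (num - 1) 0 == B then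
      match pvInnerA s I (PySem.List.pyRange num (s.length : Int) 1) 2 with
      | some length => st.1 ++ [(start.getD 0, length)]
      | none => st.1
    else st.1
  (tag, start)

def pvFindTag (input : List (List (List Int))) (B I : Int) : List (List (List (Int × Int))) :=
  (input.foldl
    (fun (acc : List (List (List (Int × Int))) × Option Int) batch =>
      let b := batch.foldl
        (fun (bacc : List (List (Int × Int)) × Option Int) s =>
          let r := (PySem.List.pyRange 0 (s.length : Int) 1).foldl (pvSentStepA B I s) ([], bacc.2)
          (bacc.1 ++ [r.1], r.2))
        ([], acc.2)
      (acc.1 ++ [b.1], b.2))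
    ([], none)).1

def find_all_tag (input : List (List (List Int))) : List (Int × List (List (List (Int × Int)))) :=
  (pvTags.foldl
    (fun (acc : Int × PySem.Dict Int (List (List (List (Int × Int))))) tag =>
      (acc.1 + 1, acc.2.insert acc.1 (pvFindTag input tag.1 tag.2)))
    (1, PySem.Dict.empty)).2.items

-- ===== PORT B =====
-- one step of Source B's right-to-left scan; state = (spans, seen7, cnt)
def pvScanStepB (B I : Int) (s : List Int) (st : List (Int × Int) × Bool × Int) (i : Int) :
    List (Int × Int) × Bool × Int :=
  let sc :=
    if PySem.List.pyGetD s i 0 == 7 then (true, (0 : Int))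
    else if PySem.List.pyGetD s i 0 == I && PySem.List.pyGetD s (i - 1) 0 == I then (st.2.1, st.2.2 + 1)
    else st.2
  let spans :=
    if PySem.List.pyGetD s i 0 == I && PySem.List.pyGetD s (i - 1) 0 == B && sc.1 then
      st.1 ++ [(i - 1, 2 + sc.2)]
    else st.1
  (spans, sc)

def pvScan (s : List Int) (B I : Int) : List (Int × Int) :=
  if s.contains 7 then
    (((PySem.List.pyRange ((s.length : Int) - 1) 0 (-1)).foldl (pvScanStepB B I s)
        ([], false, 0)).1).reverse
  else []

def find_all_tag_alt (input : List (List (List Int))) : List (Int × List (List (List (Int × Int)))) :=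
  (PySem.List.enumerate pvTags 1).map
    (fun kt => (kt.1, input.map (fun batch => batch.map (fun s => pvScan s kt.2.1 kt.2.2))))

-- ===== PRECONDITION & SPEC =====
-- a wrap-around sentence: starts with the I-tag, ends with the matching B-tag, contains a 7
def pvBad (B I : Int) (s : List Int) : Bool :=
  !s.isEmpty && (s.headD 0 == I) && (s.getLastD 0 == B) && s.contains 7

-- Pre_ excludes exactly the inputs on which A raises NameError: a wrap-around sentence
-- makes A read start_pos at position 0, which is unbound unless some earlier sentence
-- contains that B-tag.
def Pre_find_all_tag (input : List (List (List Int))) : Prop :=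
  ∀ p ∈ pvTags, ∀ k, (hk : k < input.flatten.length) →
    pvBad p.1 p.2 (input.flatten[k]'hk) = true →
    ((input.flatten.take k).any (fun s => s.contains p.1)) = true
instance (input : List (List (List Int))) : Decidable (Pre_find_all_tag input) := by
  unfold Pre_find_all_tag; infer_instance

def pvWitness_find_all_tag : List (List (List Int)) := [[[1, 2, 7]]]

-- On inputs containing a wrap-around sentence (first element an I-tag, last element the
-- matching B-tag, a 7 inside), Python's negative indexing makes A start a span at
-- position 0 and emit it with a start position left over from an earlier sentence;
-- B emits no span there, the intended behaviour since no B-tag precedes that I-tag.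
def D_find_all_tag (input : List (List (List Int))) : Prop :=
  ∃ batch ∈ input, ∃ s ∈ batch, ∃ p ∈ pvTags, pvBad p.1 p.2 s = true
instance (input : List (List (List Int))) : Decidable (D_find_all_tag input) := by
  unfold D_find_all_tag; infer_instance

def Spec_find_all_tag (input : List (List (List Int))) (out : List (Int × List (List (List (Int × Int))))) : Prop :=
  ¬ D_find_all_tag input → out = find_all_tag_alt input
instance (input : List (List (List Int))) (out : List (Int × List (List (List (Int × Int))))) : Decidable (Spec_find_all_tag input out) := by
  unfold Spec_find_all_tag; infer_instance

def pvDiffWitness_find_all_tag : List (List (List Int)) := [[[1, 7], [2, 7, 1]]]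
def pvDiffWitnessOut_find_all_tag :
    (List (Int × List (List (List (Int × Int))))) × (List (Int × List (List (List (Int × Int))))) :=
  ([(1, [[[], [(0, 2)]]]), (2, [[[], []]]), (3, [[[], []]])],
   [(1, [[[], []]]), (2, [[[], []]]), (3, [[[], []]])])

-- ===== CLAIM (what is proved, stated in full; the proofs are below) =====
def Claim_unchanged_find_all_tag : Prop := ∀ (input : List (List (List Int))), Dom_find_all_tag input → Pre_find_all_tag input → Spec_find_all_tag input (find_all_tag input)
def Claim_changed_find_all_tag : Prop := Dom_find_all_tag (pvDiffWitness_find_all_tag) ∧ Pre_find_all_tag (pvDiffWitness_find_all_tag) ∧ D_find_all_tag (pvDiffWitness_find_all_tag) ∧ find_all_tag (pvDiffWitness_find_all_tag) = pvDiffWitnessOut_find_all_tag.1 ∧ find_all_tag_alt (pvDiffWitness_find_all_tag) = pvDiffWitnessOut_find_all_tag.2 ∧ pvDiffWitnessOut_find_all_tag.1 ≠ pvDiffWitnessOut_find_all_tag.2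
def Claim_exact_find_all_tag : Prop := ∀ (input : List (List (List Int))), Dom_find_all_tag input → Pre_find_all_tag input → D_find_all_tag input → find_all_tag input ≠ find_all_tag_alt input

-- ===== LEMMAS AND PROOFS =====

def pvCnt (I p : Int) : List Int → Int
  | [] => 0
  | x :: r => if x = 7 then 0 else (if x = I ∧ p = I then 1 else 0) + pvCnt I x r
-- the span emitted at position n, if any (the common specification of both loops)
def pvEvAt (s : List Int) (B I : Int) (n : Nat) : Option (Int × Int) :=
  if 1 ≤ n ∧ s.getD n 0 = I ∧ s.getD (n - 1) 0 = B ∧ 7 ∈ s.drop (n + 1)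
  then some ((n : Int) - 1, 2 + pvCnt I (s.getD n 0) (s.drop (n + 1)))
  else none

-- all spans emitted at positions below m, in position order
def pvEv (s : List Int) (B I : Int) (m : Nat) : List (Int × Int) :=
  (List.range m).filterMap (pvEvAt s B I)

-- the value A's start_pos holds after the first m iterations of the sentence loop
def pvStartA (B : Int) (s : List Int) (st0 : Option Int) : Nat → Option Int
  | 0 => st0
  | Nat.succ n => if s.getD n 0 = B then some (n : Int) else pvStartA B s st0 n

theorem pvInnerA_none (s : List Int) (I : Int) (hI9 : I ≠ 9) :
    ∀ fuel m : Nat, s.length - m ≤ fuel → (7 ∉ s.drop m) → ∀ acc : Int,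
    pvInnerA s I (PySem.List.pyRange (m : Int) (s.length : Int) 1) acc = none := by
  intro fuel
  induction fuel with
  | zero =>
    intro m hm h7 acc
    rw [PySem.List.pyRange_one_eq_nil (by exact_mod_cast Nat.le_of_sub_eq_zero (Nat.le_zero.mp hm))]
    rfl
  | succ fuel ih =>
    intro m hm h7 acc
    by_cases hmL : s.length ≤ m
    · rw [PySem.List.pyRange_one_eq_nil (by exact_mod_cast hmL)]; rfl
    · have hlt : m < s.length := by omega
      rw [PySem.List.pyRange_one_cons (by exact_mod_cast hlt)]
      have hdc : s.drop m = s[m] :: s.drop (m + 1) := List.drop_eq_getElem_cons hlt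
      have hgm : PySem.List.pyGetD s (m : Int) 0 = s[m] := by
        rw [PySem.List.pyGetD_natCast, List.getD_eq_getElem s 0 hlt]
      have h7m : s[m] ≠ 7 := by
        intro h; exact h7 (by rw [hdc, h]; exact List.mem_cons_self ..)
      have h7r : 7 ∉ s.drop (m + 1) := fun h => h7 (by rw [hdc]; exact List.mem_cons_of_mem _ h)
      have hcast : (m : Int) + 1 = ((m + 1 : Nat) : Int) := by push_cast; ring
      simp only [pvInnerA, hgm, hcast]
      split_ifs with h1 h2 h3 h4
      · simp only [Bool.and_eq_true, beq_iff_eq] at h1 h2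
        exact absurd (h1.1.symm.trans h2) hI9
      · have : s[m] = 7 := by simpa using h3
        exact absurd this h7m
      · exact ih (m + 1) (by omega) h7r _
      · have : s[m] = 7 := by simpa using h4
        exact absurd this h7m
      · exact ih (m + 1) (by omega) h7r _
theorem pvInnerA_some (s : List Int) (I : Int) (hI7 : I ≠ 7) (hI9 : I ≠ 9) :
    ∀ fuel m : Nat, s.length - m ≤ fuel → 1 ≤ m → (7 ∈ s.drop m) → ∀ acc : Int,
    pvInnerA s I (PySem.List.pyRange (m : Int) (s.length : Int) 1) acc
      = some (acc + pvCnt I (s.getD (m - 1) 0) (s.drop m)) := by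
  intro fuel
  induction fuel with
  | zero =>
    intro m hm hm1 h7 acc
    rw [List.drop_eq_nil_of_le (by omega)] at h7
    cases h7
  | succ fuel ih =>
    intro m hm hm1 h7 acc
    have hlt : m < s.length := by
      by_contra h
      rw [List.drop_eq_nil_of_le (by omega)] at h7
      cases h7
    have hdc : s.drop m = s[m] :: s.drop (m + 1) := List.drop_eq_getElem_cons hlt
    have hgm : PySem.List.pyGetD s (m : Int) 0 = s[m] := by
      rw [PySem.List.pyGetD_natCast, List.getD_eq_getElem s 0 hlt]
    have hgm1 : PySem.List.pyGetD s ((m : Int) - 1) 0 = s.getD (m - 1) 0 := by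
      have : ((m : Int) - 1) = ((m - 1 : Nat) : Int) := by omega
      rw [this, PySem.List.pyGetD_natCast]
    have hgDm : s.getD m 0 = s[m] := List.getD_eq_getElem s 0 hlt
    rw [PySem.List.pyRange_one_cons (by exact_mod_cast hlt)]
    have hcast : (m : Int) + 1 = ((m + 1 : Nat) : Int) := by push_cast; ring
    have hgDm' : s.getD (m + 1 - 1) 0 = s[m] := by rw [Nat.add_sub_cancel]; exact hgDm
    simp only [pvInnerA, hgm, hgm1, hcast, hdc, pvCnt]
    by_cases hm7 : s[m] = 7
    · rw [if_neg (by simp only [Bool.and_eq_true, beq_iff_eq]; rintro ⟨h, -⟩; exact hI7 (h.symm.trans hm7)),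
         if_pos (by simp only [beq_iff_eq]; exact hm7), if_pos hm7]
      simp
    · have h7r : 7 ∈ s.drop (m + 1) := by
        rw [hdc] at h7
        rcases List.mem_cons.mp h7 with h | h
        · exact absurd h.symm hm7
        · exact h
      rw [if_neg hm7]
      by_cases hmI : s[m] = I
      · by_cases hprev : s.getD (m - 1) 0 = I
        · rw [if_pos (by simp only [Bool.and_eq_true, beq_iff_eq]; exact ⟨hmI, hprev⟩),
             if_neg (by simp only [beq_iff_eq]; rw [hmI]; exact hI9),
             if_neg (by simp only [beq_iff_eq]; rw [hmI]; exact hI7),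
             ih (m + 1) (by omega) (by omega) h7r (acc + 1),
             if_pos ⟨hmI, hprev⟩, hgDm']
          congr 1; ring
        · rw [if_neg (by simp only [Bool.and_eq_true, beq_iff_eq]; rintro ⟨-, h⟩; exact hprev h),
             if_neg (by simp only [beq_iff_eq]; exact hm7),
             ih (m + 1) (by omega) (by omega) h7r acc,
             if_neg (by rintro ⟨-, h⟩; exact hprev h), hgDm']
          congr 1; ring
      · rw [if_neg (by simp only [Bool.and_eq_true, beq_iff_eq]; rintro ⟨h, -⟩; exact hmI h),
           if_neg (by simp only [beq_iff_eq]; exact hm7),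
           ih (m + 1) (by omega) (by omega) h7r acc,
           if_neg (by rintro ⟨h, -⟩; exact hmI h), hgDm']
        congr 1; ring
theorem pvEv_succ (s : List Int) (B I : Int) (m : Nat) :
    pvEv s B I (m + 1) = pvEv s B I m ++ (pvEvAt s B I m).toList := by
  simp only [pvEv, List.range_succ, List.filterMap_append]
  cases h : pvEvAt s B I m <;> simp [h]
-- the extra span A emits at the wrap-around position 0 (start taken from the carried start_pos)
def pvEv0 (B I : Int) (s : List Int) (st0 : Option Int) (m : Nat) : List (Int × Int) :=
  if 1 ≤ m ∧ pvBad B I s = true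
  then [(st0.getD 0, 2 + pvCnt I (s.getD 0 0) (s.drop 1))] else []

theorem pvHeadD (s : List Int) : s.headD 0 = s.getD 0 0 := by cases s <;> rfl

theorem pvBad_iff (B I : Int) (s : List Int) (hne : s ≠ []) :
    pvBad B I s = true ↔ s.getD 0 0 = I ∧ s.getLast hne = B ∧ 7 ∈ s := by
  rw [pvBad]
  simp only [Bool.and_eq_true, beq_iff_eq, pvHeadD,
    List.getLastD_eq_getLast?, List.getLast?_eq_getLast_of_ne_nil hne, Option.getD_some,
    Bool.not_eq_eq_eq_not, Bool.not_true, List.isEmpty_eq_false_iff]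
  constructor
  · rintro ⟨⟨⟨-, h1⟩, h2⟩, h3⟩
    exact ⟨h1, h2, by simpa [List.elem_iff] using h3⟩
  · rintro ⟨h1, h2, h3⟩
    exact ⟨⟨⟨hne, h1⟩, h2⟩, List.elem_eq_true_of_mem h3⟩

theorem pvA_inv (B I : Int) (hBI : B ≠ I) (hI7 : I ≠ 7) (hI9 : I ≠ 9) (s : List Int) :
    ∀ (m : Nat), m ≤ s.length → ∀ (st0 : Option Int),
    (PySem.List.pyRange 0 (m : Int) 1).foldl (pvSentStepA B I s) ([], st0)
      = (pvEv0 B I s st0 m ++ pvEv s B I m, pvStartA B s st0 m) := by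
  intro m
  induction m with
  | zero =>
    intro _ st0
    simp only [Nat.cast_zero, PySem.List.pyRange_one_eq_nil le_rfl]
    rfl
  | succ m ih =>
    intro hm st0
    have hlt : m < s.length := by omega
    have hdc : s.drop m = s[m] :: s.drop (m + 1) := List.drop_eq_getElem_cons hlt
    have hgm : PySem.List.pyGetD s (m : Int) 0 = s[m] := by
      rw [PySem.List.pyGetD_natCast, List.getD_eq_getElem s 0 hlt]
    have hgDm : s.getD m 0 = s[m] := List.getD_eq_getElem s 0 hlt
    rw [show ((m + 1 : Nat) : Int) = (m : Int) + 1 by push_cast; ring,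
        PySem.List.pyRange_one_succ_right (by positivity), List.foldl_append,
        ih (by omega) st0, List.foldl_cons, List.foldl_nil, pvEv_succ]
    simp only [pvSentStepA, Prod.mk.injEq]
    constructor
    · -- sentence_tag component
      by_cases hI : s[m] = I
      · rcases Nat.eq_zero_or_pos m with hm0 | hm1
        · -- num = 0 : the wrap-around position
          subst hm0
          have hne : s ≠ [] := by intro h; rw [h] at hlt; simp at hlt
          rw [show ((0 : Nat) : Int) - 1 = -1 by norm_num, PySem.List.pyGetD_neg_one s 0 hne]
          have hev0 : pvEvAt s B I 0 = none := by simp [pvEvAt]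
          have hpv : pvEv s B I 0 = [] := rfl
          by_cases hlast : s.getLast hne = B
          · rw [if_pos (by simp only [Bool.and_eq_true, beq_iff_eq, hgm]; exact ⟨hI, hlast⟩)]
            by_cases h7 : 7 ∈ s
            · -- A really emits the wrap-around span here
              have hbad : pvBad B I s = true :=
                (pvBad_iff B I s hne).mpr ⟨by rw [hgDm]; exact hI, hlast, h7⟩
              have hd1 : s.drop 0 = s[0] :: s.drop 1 := hdc
              have h7d : 7 ∈ s.drop 1 := by
                have := h7
                rw [show s = s.drop 0 from rfl, hd1] at this
                rcases List.mem_cons.mp this with h | h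
                · exact absurd (hI.symm.trans h.symm) hI7
                · exact h
              have hgm0 : PySem.List.pyGetD s (0 : Int) 0 = s[0] := by
                rw [show (0 : Int) = ((0 : Nat) : Int) by norm_num]; exact hgm
              have hinner : pvInnerA s I
                    (PySem.List.pyRange (((0 : Nat) : Int)) (s.length : Int) 1) 2
                  = some (2 + pvCnt I (s.getD 0 0) (s.drop 1)) := by
                rw [show ((0 : Nat) : Int) = (0 : Int) by norm_num,
                    PySem.List.pyRange_one_cons (by exact_mod_cast hlt)]
                simp only [pvInnerA, show (0 : Int) - 1 = -1 by norm_num,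
                  PySem.List.pyGetD_neg_one s 0 hne, hgm0]
                rw [if_neg (by
                      simp only [Bool.and_eq_true, beq_iff_eq]
                      rintro ⟨-, h⟩
                      exact hBI (hlast.symm.trans h)),
                    if_neg (by
                      simp only [beq_iff_eq]
                      exact fun h => hI7 (hI.symm.trans h)),
                    show (0 : Int) + 1 = ((1 : Nat) : Int) by norm_num,
                    pvInnerA_some s I hI7 hI9 s.length 1 (by omega) (by omega) h7d 2]
              rw [hinner, hev0, hpv]
              rw [if_neg (by
                    simp only [beq_iff_eq, hgm]
                    exact fun h => hBI (h.symm.trans hI))]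
              simp [pvEv0, hbad, pvStartA]
            · -- no 7 anywhere: the inner loop never breaks, nothing is emitted
              have h7' : 7 ∉ s.drop 0 := by simpa using h7
              rw [pvInnerA_none s I hI9 s.length 0 (by omega) h7', hev0, hpv]
              have hbad : pvBad B I s = false := by
                rw [← Bool.not_eq_true]
                intro h
                exact h7 ((pvBad_iff B I s hne).mp h).2.2
              simp [pvEv0, hbad]
          · rw [if_neg (by simp only [Bool.and_eq_true, beq_iff_eq]; rintro ⟨-, h⟩; exact hlast h),
                hev0, hpv]
            have hbad : pvBad B I s = false := by
              rw [← Bool.not_eq_true]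
              intro h
              exact hlast ((pvBad_iff B I s hne).mp h).2.1
            simp [pvEv0, hbad]
        · -- num = m ≥ 1
          have he0 : pvEv0 B I s st0 (m + 1) = pvEv0 B I s st0 m := by
            unfold pvEv0
            rw [if_congr (and_congr_left' (show (1 ≤ m + 1) ↔ 1 ≤ m by omega)) rfl rfl]
          rw [he0]
          have hgm1 : PySem.List.pyGetD s ((m : Int) - 1) 0 = s.getD (m - 1) 0 := by
            have : ((m : Int) - 1) = ((m - 1 : Nat) : Int) := by omega
            rw [this, PySem.List.pyGetD_natCast]
          rw [hgm, hgm1]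
          by_cases hB : s.getD (m - 1) 0 = B
          · rw [if_pos (by simp only [Bool.and_eq_true, beq_iff_eq]; exact ⟨hI, hB⟩)]
            by_cases h7 : 7 ∈ s.drop (m + 1)
            · rw [pvInnerA_some s I hI7 hI9 s.length m (by omega) hm1
                    (by rw [hdc]; exact List.mem_cons_of_mem _ h7) 2]
              have hcnt : pvCnt I (s.getD (m - 1) 0) (s.drop m)
                  = pvCnt I s[m] (s.drop (m + 1)) := by
                rw [hdc]
                simp only [pvCnt]
                rw [if_neg (hI ▸ hI7 : ¬s[m] = 7),
                    if_neg (by rintro ⟨-, h⟩; exact hBI (hB ▸ h.symm).symm)]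
                exact zero_add _
              rw [hcnt]
              have hev : pvEvAt s B I m
                  = some ((m : Int) - 1, 2 + pvCnt I s[m] (s.drop (m + 1))) := by
                rw [pvEvAt, if_pos ⟨hm1, by rw [hgDm]; exact hI, hB, h7⟩, hgDm]
              rw [hev]
              rw [if_neg (by simp only [beq_iff_eq]; rw [hI]; exact fun h => hBI h.symm)]
              obtain ⟨n, rfl⟩ : ∃ n, m = n + 1 := ⟨m - 1, by omega⟩
              have hst : pvStartA B s st0 (n + 1) = some (n : Int) := by
                rw [pvStartA, if_pos (by simpa using hB)]
              rw [hst]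
              simp only [Option.getD_some, Option.toList_some, List.append_assoc]
              congr 3
              push_cast
              ring_nf
            · rw [pvInnerA_none s I hI9 s.length m (by omega)
                    (by
                      rw [hdc]
                      intro hmem
                      rcases List.mem_cons.mp hmem with h | h
                      · exact hI7 (hI.symm.trans h.symm)
                      · exact h7 h)]
              have hev : pvEvAt s B I m = none := by
                rw [pvEvAt, if_neg (by rintro ⟨-, -, -, h⟩; exact h7 h)]
              rw [hev]; simp
          · rw [if_neg (by simp only [Bool.and_eq_true, beq_iff_eq]; rintro ⟨-, h⟩; exact hB h)]
            have hev : pvEvAt s B I m = none := by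
              rw [pvEvAt, if_neg (by rintro ⟨-, -, h, -⟩; exact hB h)]
            rw [hev]; simp
      · have he0 : pvEv0 B I s st0 (m + 1) = pvEv0 B I s st0 m ∨
            (pvEv0 B I s st0 (m + 1) = [] ∧ pvEv0 B I s st0 m = []) := by
          rcases Nat.eq_zero_or_pos m with hm0 | hm1
          · right
            subst hm0
            constructor
            · have hbad : pvBad B I s = false := by
                rw [← Bool.not_eq_true]
                intro h
                have hne : s ≠ [] := by
                  intro hnil; rw [hnil] at hlt; simp at hlt
                exact hI (by rw [← hgDm]; exact ((pvBad_iff B I s hne).mp h).1)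
              simp [pvEv0, hbad]
            · simp [pvEv0]
          · left
            unfold pvEv0
            rw [if_congr (and_congr_left' (show (1 ≤ m + 1) ↔ 1 ≤ m by omega)) rfl rfl]
        rw [if_neg (by simp only [Bool.and_eq_true, beq_iff_eq]; rw [hgm]; rintro ⟨h, -⟩; exact hI h)]
        have hev : pvEvAt s B I m = none := by
          rw [pvEvAt, if_neg (by rw [hgDm]; rintro ⟨-, h, -⟩; exact hI h)]
        rw [hev]
        rcases he0 with h | ⟨h1, h2⟩
        · rw [h]; simp
        · rw [h1, h2]; simp
    · -- start_pos component
      rw [pvStartA, hgm, hgDm]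
      split_ifs with h1 h2 h2 <;>
        first
        | rfl
        | (exact absurd (by simpa using h1) h2)
        | (exact absurd (by simpa using h2) h1)

theorem pvA_inv_clean (B I : Int) (hBI : B ≠ I) (hI7 : I ≠ 7) (hI9 : I ≠ 9) (s : List Int)
    (hb : pvBad B I s = false) (m : Nat) (hm : m ≤ s.length) (st0 : Option Int) :
    (PySem.List.pyRange 0 (m : Int) 1).foldl (pvSentStepA B I s) ([], st0)
      = (pvEv s B I m, pvStartA B s st0 m) := by
  rw [pvA_inv B I hBI hI7 hI9 s m hm st0]
  simp [pvEv0, hb]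

theorem pvB_inv (B I : Int) (hBI : B ≠ I) (hI7 : I ≠ 7) (s : List Int) :
    ∀ (m : Nat), m < s.length → ∀ sp,
    (PySem.List.pyRange (m : Int) 0 (-1)).foldl (pvScanStepB B I s)
        (sp, decide (7 ∈ s.drop (m + 1)), pvCnt I (s.getD m 0) (s.drop (m + 1)))
      = (sp ++ (pvEv s B I (m + 1)).reverse,
         decide (7 ∈ s.drop 1), pvCnt I (s.getD 0 0) (s.drop 1)) := by
  intro m
  induction m with
  | zero =>
    intro _ sp
    have hev0 : pvEvAt s B I 0 = none := by simp [pvEvAt]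
    simp [PySem.List.pyRange_neg_one_eq_nil le_rfl, pvEv, List.range_one, hev0]
  | succ m ih =>
    intro hm sp
    have hlt2 : m + 1 < s.length := hm
    have hdc2 : s.drop (m + 1) = s[m + 1] :: s.drop (m + 2) := List.drop_eq_getElem_cons hlt2
    have hgm : PySem.List.pyGetD s ((m + 1 : Nat) : Int) 0 = s[m + 1] := by
      rw [PySem.List.pyGetD_natCast, List.getD_eq_getElem s 0 hlt2]
    have hgD : s.getD (m + 1) 0 = s[m + 1] := List.getD_eq_getElem s 0 hlt2
    have hgm1 : PySem.List.pyGetD s (((m + 1 : Nat) : Int) - 1) 0 = s.getD m 0 := by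
      rw [show ((m + 1 : Nat) : Int) - 1 = ((m : Nat) : Int) by push_cast; ring,
          PySem.List.pyGetD_natCast]
    rw [PySem.List.pyRange_neg_one_cons (by positivity), List.foldl_cons,
        show ((m + 1 : Nat) : Int) - 1 = (m : Int) by push_cast; ring]
    have hstep : pvScanStepB B I s
        (sp, decide (7 ∈ s.drop (m + 1 + 1)), pvCnt I (s.getD (m + 1) 0) (s.drop (m + 1 + 1)))
        ((m + 1 : Nat) : Int)
        = (sp ++ (pvEvAt s B I (m + 1)).toList,
           decide (7 ∈ s.drop (m + 1)), pvCnt I (s.getD m 0) (s.drop (m + 1))) := by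
      simp only [pvScanStepB, hgm, hgm1]
      have hsc : (if (s[m + 1] == (7 : Int)) = true then (true, (0 : Int))
          else if (s[m + 1] == I && s.getD m 0 == I) = true then
            (decide (7 ∈ s.drop (m + 1 + 1)), pvCnt I (s.getD (m + 1) 0) (s.drop (m + 1 + 1)) + 1)
          else (decide (7 ∈ s.drop (m + 1 + 1)), pvCnt I (s.getD (m + 1) 0) (s.drop (m + 1 + 1))))
          = (decide (7 ∈ s.drop (m + 1)), pvCnt I (s.getD m 0) (s.drop (m + 1))) := by
        by_cases h7 : s[m + 1] = 7
        · rw [if_pos (by simpa using h7), hdc2, h7]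
          simp [pvCnt]
        · rw [if_neg (by simpa using h7)]
          have hne7 : (7 : Int) ≠ s[m + 1] := fun h => h7 h.symm
          have hseen : decide (7 ∈ s.drop (m + 1)) = decide (7 ∈ s.drop (m + 2)) := by
            refine decide_eq_decide.mpr ?_
            rw [hdc2]
            exact ⟨fun h => (List.mem_cons.mp h).resolve_left hne7, List.mem_cons_of_mem _⟩
          by_cases hpair : s[m + 1] = I ∧ s.getD m 0 = I
          · rw [if_pos (by simp only [Bool.and_eq_true, beq_iff_eq]; exact hpair)]
            have hcnt : pvCnt I (s.getD m 0) (s.drop (m + 1))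
                = pvCnt I (s.getD (m + 1) 0) (s.drop (m + 1 + 1)) + 1 := by
              rw [hdc2]; simp only [pvCnt]
              rw [if_neg h7, if_pos hpair, hgD]
              ring
            rw [hseen, hcnt]
          · rw [if_neg (by simp only [Bool.and_eq_true, beq_iff_eq]; exact hpair)]
            have hcnt : pvCnt I (s.getD m 0) (s.drop (m + 1))
                = pvCnt I (s.getD (m + 1) 0) (s.drop (m + 1 + 1)) := by
              rw [hdc2]; simp only [pvCnt]
              rw [if_neg h7, if_neg hpair, hgD]
              ring
            rw [hseen, hcnt]
      rw [hsc]
      by_cases hI' : s[m + 1] = I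
      · by_cases hB' : s.getD m 0 = B
        · by_cases h7s : 7 ∈ s.drop (m + 2)
          · rw [if_pos (by
                simp only [Bool.and_eq_true, beq_iff_eq, decide_eq_true_eq]
                exact ⟨⟨hI', hB'⟩, by rw [hdc2]; exact List.mem_cons_of_mem _ h7s⟩)]
            have h7' : ¬s[m + 1] = 7 := fun h => hI7 (hI'.symm.trans h)
            have hcnt2 : pvCnt I (s.getD m 0) (s.drop (m + 1))
                = pvCnt I (s.getD (m + 1) 0) (s.drop (m + 1 + 1)) := by
              rw [hdc2]; simp only [pvCnt]
              rw [if_neg h7', if_neg (by rintro ⟨-, hy⟩; exact hBI (hB'.symm.trans hy)), hgD]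
              ring
            have hev : pvEvAt s B I (m + 1)
                = some (((m + 1 : Nat) : Int) - 1,
                    2 + pvCnt I (s.getD m 0) (s.drop (m + 1))) := by
              rw [pvEvAt, if_pos ⟨by omega, by rw [hgD]; exact hI', by simpa using hB', h7s⟩, hcnt2]
            rw [hev]
            rfl
          · rw [if_neg (by
                simp only [Bool.and_eq_true, beq_iff_eq, decide_eq_true_eq]
                rintro ⟨⟨hx, -⟩, hmem⟩
                rw [hdc2] at hmem
                rcases List.mem_cons.mp hmem with h | h
                · exact hI7 (hx.symm.trans h.symm)
                · exact h7s h)]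
            have hev : pvEvAt s B I (m + 1) = none := by
              rw [pvEvAt, if_neg (by rintro ⟨-, -, -, h⟩; exact h7s h)]
            rw [hev]
            simp
        · rw [if_neg (by
              simp only [Bool.and_eq_true, beq_iff_eq]
              rintro ⟨⟨-, h⟩, -⟩; exact hB' h)]
          have hev : pvEvAt s B I (m + 1) = none := by
            rw [pvEvAt, if_neg (by rintro ⟨-, -, h, -⟩; exact hB' (by simpa using h))]
          rw [hev]
          simp
      · rw [if_neg (by
            simp only [Bool.and_eq_true, beq_iff_eq]
            rintro ⟨⟨h, -⟩, -⟩; exact hI' h)]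
        have hev : pvEvAt s B I (m + 1) = none := by
          rw [pvEvAt, if_neg (by rw [hgD]; rintro ⟨-, h, -⟩; exact hI' h)]
        rw [hev]
        simp
    rw [hstep, ih (by omega) (sp ++ (pvEvAt s B I (m + 1)).toList)]
    rw [pvEv_succ s B I (m + 1), List.reverse_append, List.append_assoc]
    congr 2
    cases pvEvAt s B I (m + 1) <;> simp

theorem pvScan_eq (B I : Int) (hBI : B ≠ I) (hI7 : I ≠ 7) (s : List Int) :
    pvScan s B I = pvEv s B I s.length := by
  unfold pvScan
  by_cases h7all : s.contains 7 = true
  swap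
  · rw [if_neg h7all]
    have h7' : 7 ∉ s := fun hm => h7all (List.elem_eq_true_of_mem hm)
    have hnone : ∀ n, pvEvAt s B I n = none := by
      intro n
      rw [pvEvAt, if_neg]
      rintro ⟨-, -, -, h⟩
      exact h7' (List.mem_of_mem_drop h)
    simp only [pvEv]
    symm
    exact List.filterMap_eq_nil_iff.mpr (fun a _ => hnone a)
  rw [if_pos h7all]
  cases hs : s.length with
  | zero =>
    have hnil : s = [] := List.eq_nil_of_length_eq_zero hs
    subst hnil
    rfl
  | succ n =>
    rw [show ((n + 1 : Nat) : Int) - 1 = (n : Int) by push_cast; ring]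
    have hdrop : s.drop (n + 1) = [] := List.drop_eq_nil_of_le (by omega)
    have hinit : (([] : List (Int × Int)), false, (0 : Int))
        = (([] : List (Int × Int)), decide (7 ∈ s.drop (n + 1)),
           pvCnt I (s.getD n 0) (s.drop (n + 1))) := by
      rw [hdrop]; simp [pvCnt]
    rw [hinit, pvB_inv B I hBI hI7 s n (by omega) []]
    simp

theorem pvSent_eq (B I : Int) (hBI : B ≠ I) (hI7 : I ≠ 7) (hI9 : I ≠ 9) (s : List Int)
    (hb : pvBad B I s = false) (st0 : Option Int) :
    ((PySem.List.pyRange 0 (s.length : Int) 1).foldl (pvSentStepA B I s) ([], st0)).1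
      = pvScan s B I := by
  rw [pvScan_eq B I hBI hI7 s, pvA_inv_clean B I hBI hI7 hI9 s hb s.length le_rfl st0]

theorem pvBatch_eq (B I : Int) (hBI : B ≠ I) (hI7 : I ≠ 7) (hI9 : I ≠ 9)
    (batch : List (List Int)) (hall : ∀ s ∈ batch, pvBad B I s = false) :
    ∀ (acc : List (List (Int × Int))) (st : Option Int),
    (batch.foldl
        (fun (bacc : List (List (Int × Int)) × Option Int) s =>
          let r := (PySem.List.pyRange 0 (s.length : Int) 1).foldl (pvSentStepA B I s) ([], bacc.2)
          (bacc.1 ++ [r.1], r.2))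
        (acc, st)).1
      = acc ++ batch.map (fun s => pvScan s B I) := by
  induction batch with
  | nil => intro acc st; simp
  | cons s bs ih =>
    intro acc st
    simp only [List.foldl_cons, List.map_cons]
    rw [ih (fun x hx => hall x (List.mem_cons_of_mem _ hx)),
        pvSent_eq B I hBI hI7 hI9 s (hall s (List.mem_cons_self ..)) st]
    simp

theorem pvFindTag_eq (B I : Int) (hBI : B ≠ I) (hI7 : I ≠ 7) (hI9 : I ≠ 9)
    (input : List (List (List Int)))
    (hall : ∀ batch ∈ input, ∀ s ∈ batch, pvBad B I s = false) :
    pvFindTag input B I = input.map (fun batch => batch.map (fun s => pvScan s B I)) := by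
  unfold pvFindTag
  suffices h : ∀ (inp : List (List (List Int))),
      (∀ batch ∈ inp, ∀ s ∈ batch, pvBad B I s = false) →
      ∀ (acc : List (List (List (Int × Int)))) (st : Option Int),
      (inp.foldl
        (fun (acc : List (List (List (Int × Int))) × Option Int) batch =>
          let b := batch.foldl
            (fun (bacc : List (List (Int × Int)) × Option Int) s =>
              let r := (PySem.List.pyRange 0 (s.length : Int) 1).foldl (pvSentStepA B I s) ([], bacc.2)
              (bacc.1 ++ [r.1], r.2))
            ([], acc.2)
          (acc.1 ++ [b.1], b.2))
        (acc, st)).1 = acc ++ inp.map (fun batch => batch.map (fun s => pvScan s B I)) by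
    exact h input hall [] none
  intro inp
  induction inp with
  | nil => intro _ acc st; simp
  | cons batch rest ih =>
    intro hall2 acc st
    simp only [List.foldl_cons, List.map_cons]
    rw [ih (fun b hb s hs => hall2 b (List.mem_cons_of_mem _ hb) s hs),
        pvBatch_eq B I hBI hI7 hI9 batch (hall2 batch (List.mem_cons_self ..)) [] st]
    simp

theorem find_all_tag_shape (input : List (List (List Int))) :
    find_all_tag input
      = [(1, pvFindTag input 1 2), (2, pvFindTag input 3 4), (3, pvFindTag input 5 6)] := rfl

theorem find_all_tag_alt_shape (input : List (List (List Int))) :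
    find_all_tag_alt input
      = [(1, input.map (fun batch => batch.map (fun s => pvScan s 1 2))),
         (2, input.map (fun batch => batch.map (fun s => pvScan s 3 4))),
         (3, input.map (fun batch => batch.map (fun s => pvScan s 5 6)))] := rfl

-- length of A's per-sentence output: B's spans plus one wrap-around span on a bad sentence
def pvLenA (B I : Int) (s : List Int) : Nat :=
  (if pvBad B I s = true then 1 else 0) + (pvEv s B I s.length).length

theorem pvBad_ne_nil (B I : Int) (s : List Int) (h : pvBad B I s = true) : s ≠ [] := by
  intro hnil
  subst hnil
  simp [pvBad] at h

theorem pvSentLen (B I : Int) (hBI : B ≠ I) (hI7 : I ≠ 7) (hI9 : I ≠ 9)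
    (s : List Int) (st0 : Option Int) :
    (((PySem.List.pyRange 0 (s.length : Int) 1).foldl (pvSentStepA B I s) ([], st0)).1).length
      = pvLenA B I s := by
  rw [pvA_inv B I hBI hI7 hI9 s s.length le_rfl st0]
  show (pvEv0 B I s st0 s.length ++ pvEv s B I s.length).length = _
  rw [List.length_append, pvLenA]
  congr 1
  by_cases hb : pvBad B I s = true
  · have h1 : 1 ≤ s.length := by
      have hne := pvBad_ne_nil B I s hb
      cases s with
      | nil => exact absurd rfl hne
      | cons a t => simp
    simp [pvEv0, hb, h1]
  · simp [pvEv0, hb]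

theorem pvBatchLen (B I : Int) (hBI : B ≠ I) (hI7 : I ≠ 7) (hI9 : I ≠ 9)
    (batch : List (List Int)) :
    ∀ (acc : List (List (Int × Int))) (st : Option Int),
    (((batch.foldl
        (fun (bacc : List (List (Int × Int)) × Option Int) s =>
          let r := (PySem.List.pyRange 0 (s.length : Int) 1).foldl (pvSentStepA B I s) ([], bacc.2)
          (bacc.1 ++ [r.1], r.2))
        (acc, st)).1).map List.length)
      = acc.map List.length ++ batch.map (pvLenA B I) := by
  induction batch with
  | nil => intro acc st; simp
  | cons s bs ih =>
    intro acc st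
    simp only [List.foldl_cons, List.map_cons]
    rw [ih]
    simp [pvSentLen B I hBI hI7 hI9 s st]

theorem pvInputLen (B I : Int) (hBI : B ≠ I) (hI7 : I ≠ 7) (hI9 : I ≠ 9)
    (input : List (List (List Int))) :
    ∀ (acc : List (List (List (Int × Int)))) (st : Option Int),
    (((input.foldl
        (fun (acc : List (List (List (Int × Int))) × Option Int) batch =>
          let b := batch.foldl
            (fun (bacc : List (List (Int × Int)) × Option Int) s =>
              let r := (PySem.List.pyRange 0 (s.length : Int) 1).foldl (pvSentStepA B I s) ([], bacc.2)
              (bacc.1 ++ [r.1], r.2))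
            ([], acc.2)
          (acc.1 ++ [b.1], b.2))
        (acc, st)).1).map (fun b => b.map List.length))
      = acc.map (fun b => b.map List.length) ++ input.map (fun batch => batch.map (pvLenA B I)) := by
  induction input with
  | nil => intro acc st; simp
  | cons batch rest ih =>
    intro acc st
    simp only [List.foldl_cons, List.map_cons]
    rw [ih]
    rw [List.map_append]
    have := pvBatchLen B I hBI hI7 hI9 batch [] st
    simp only [List.map_nil, List.nil_append] at this
    simp [this]

theorem pvFindTagLen (B I : Int) (hBI : B ≠ I) (hI7 : I ≠ 7) (hI9 : I ≠ 9)
    (input : List (List (List Int))) :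
    (pvFindTag input B I).map (fun b => b.map List.length)
      = input.map (fun batch => batch.map (pvLenA B I)) := by
  unfold pvFindTag
  rw [pvInputLen B I hBI hI7 hI9 input [] none]
  simp

theorem pvFindTag_ne (B I : Int) (hBI : B ≠ I) (hI7 : I ≠ 7) (hI9 : I ≠ 9)
    (input : List (List (List Int))) (batch : List (List Int)) (s : List Int)
    (hbm : batch ∈ input) (hsm : s ∈ batch) (hbad : pvBad B I s = true) :
    pvFindTag input B I ≠ input.map (fun batch => batch.map (fun s => pvScan s B I)) := by
  intro heq
  have h1 := congrArg (List.map (fun b : List (List (Int × Int)) => b.map List.length)) heq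
  rw [pvFindTagLen B I hBI hI7 hI9 input] at h1
  simp only [List.map_map] at h1
  have h2 := (List.map_inj_left.mp h1) batch hbm
  simp only [Function.comp, List.map_map] at h2
  have h3 := (List.map_inj_left.mp h2) s hsm
  simp only [Function.comp] at h3
  rw [pvScan_eq B I hBI hI7 s] at h3
  rw [pvLenA, if_pos hbad] at h3
  omega

-- ===== VERDICT (by name: the statement is the Claim_ definition above) =====
theorem find_all_tag_spec : Claim_unchanged_find_all_tag := by
  unfold Claim_unchanged_find_all_tag
  intro input _ _ hnd
  have hall : ∀ (p : Int × Int), p ∈ pvTags → ∀ batch ∈ input, ∀ s ∈ batch,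
      pvBad p.1 p.2 s = false := by
    intro p hp batch hb s hs
    by_contra h
    exact hnd ⟨batch, hb, s, hs, p, hp, by simpa using h⟩
  rw [find_all_tag_shape, find_all_tag_alt_shape,
      pvFindTag_eq 1 2 (by decide) (by decide) (by decide) input (hall (1, 2) (by decide)),
      pvFindTag_eq 3 4 (by decide) (by decide) (by decide) input (hall (3, 4) (by decide)),
      pvFindTag_eq 5 6 (by decide) (by decide) (by decide) input (hall (5, 6) (by decide))]

theorem find_all_tag_changed : Claim_changed_find_all_tag := by
  unfold Claim_changed_find_all_tag
  refine ⟨by decide, by decide, by decide, by decide, by decide, by decide⟩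

theorem find_all_tag_tight : Claim_exact_find_all_tag := by
  unfold Claim_exact_find_all_tag
  intro input _ _ hD heq
  obtain ⟨batch, hbm, s, hsm, p, hp, hbad⟩ := hD
  rw [find_all_tag_shape, find_all_tag_alt_shape] at heq
  simp only [List.cons.injEq, Prod.mk.injEq, and_true, true_and] at heq
  simp only [pvTags, List.mem_cons, List.not_mem_nil, or_false] at hp
  rcases hp with rfl | rfl | rfl
  · exact pvFindTag_ne 1 2 (by decide) (by decide) (by decide) input batch s hbm hsm hbad heq.1
  · exact pvFindTag_ne 3 4 (by decide) (by decide) (by decide) input batch s hbm hsm hbad heq.2.1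
  · exact pvFindTag_ne 5 6 (by decide) (by decide) (by decide) input batch s hbm hsm hbad heq.2.2
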